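-- pv_equiv track=rewrite | github.com/sam-flahive/dyl-encryption | dyl_0.1.py | reverse_letter_output_VIII
-- ===== SOURCE A (Python) =====
-- list_of_letters_VIII = 'aX<=:{)"O#J0\']7 b$Qjm9|q+hV^sCR%vg43z(-x_SIl5B1p/uAf,rK?L.oUcwi*dNZey~E6HG£!;t@&8>[FnYkT}PMD2W'
--
-- def reverse_letter_output_VIII(letter, value):
--          order_of_letters = {}
--          for let in list_of_letters_VIII:
--                   if value % 94 == 0:
--                            order_of_letters[let] = 94
--                   else:
--                            order_of_letters[let] = value % 94
--                   value += 1
--          return(order_of_letters[letter])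
-- ===== SOURCE B (Python) =====
-- list_of_letters_VIII = 'aX<=:{)"O#J0\']7 b$Qjm9|q+hV^sCR%vg43z(-x_SIl5B1p/uAf,rK?L.oUcwi*dNZey~E6HG£!;t@&8>[FnYkT}PMD2W'
--
-- index_map = {let: i for i, let in enumerate(list_of_letters_VIII)}
--
-- def reverse_letter_output_VIII(letter, value):
--     return (value + index_map[letter] - 1) % 94 + 1
-- ===== Notes on version B (the rewrite author's own statement) =====
-- stated objective: faster
-- what changed: Replaced the 94-iteration dict-building loop with a module-level position map built once and a closed-form ((value + index - 1) % 94) + 1 per call.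
import Mathlib
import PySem

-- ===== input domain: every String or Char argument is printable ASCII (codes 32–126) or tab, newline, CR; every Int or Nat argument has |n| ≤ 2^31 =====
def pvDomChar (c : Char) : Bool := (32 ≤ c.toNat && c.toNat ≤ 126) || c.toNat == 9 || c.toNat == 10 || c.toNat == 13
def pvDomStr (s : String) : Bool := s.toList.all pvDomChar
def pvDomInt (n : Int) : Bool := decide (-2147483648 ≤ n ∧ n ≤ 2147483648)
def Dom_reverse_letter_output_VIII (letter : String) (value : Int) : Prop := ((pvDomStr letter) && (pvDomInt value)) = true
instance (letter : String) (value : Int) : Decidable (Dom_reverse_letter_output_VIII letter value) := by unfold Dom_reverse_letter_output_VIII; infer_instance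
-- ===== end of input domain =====

-- B precomputes the letter→position map once and returns the closed form ((value + i - 1) % 94) + 1,
-- eliminating A's 94-iteration dict-building loop (return-value equivalence; neither mutates its arguments).

-- shared module-level constant
def lettersVIII : String := "aX<=:{)\"O#J0']7 b$Qjm9|q+hV^sCR%vg43z(-x_SIl5B1p/uAf,rK?L.oUcwi*dNZey~E6HG£!;t@&8>[FnYkT}PMD2W"

-- ===== PORT A =====
-- loop body: order_of_letters[let] = 94 if value % 94 == 0 else value % 94; value += 1
def revStepA (st : PySem.Dict String Int × Int) (c : Char) : PySem.Dict String Int × Int :=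
  if PySem.Int.mod st.2 94 = 0 then
    (st.1.insert (String.mk [c]) 94, st.2 + 1)
  else
    (st.1.insert (String.mk [c]) (PySem.Int.mod st.2 94), st.2 + 1)

def reverse_letter_output_VIII (letter : String) (value : Int) : Int :=
  (((lettersVIII.toList.foldl revStepA (PySem.Dict.empty, value)).1.get? letter).getD 0)   -- get? = none is the KeyError case, excluded by Pre_

-- ===== PORT B =====
-- index_map = {let: i for i, let in enumerate(list_of_letters_VIII)}
def indexMapVIII : PySem.Dict String Int :=
  (PySem.List.enumerate lettersVIII.toList).foldl
    (fun d p => d.insert (String.mk [p.2]) p.1) PySem.Dict.empty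

def reverse_letter_output_VIII_alt (letter : String) (value : Int) : Int :=
  match indexMapVIII.get? letter with
  | some i => PySem.Int.mod (value + i - 1) 94 + 1
  | none => 0   -- KeyError case, excluded by Pre_

-- ===== PRECONDITION & SPEC =====
-- Pre_ excludes exactly the letters that are not a character of list_of_letters_VIII, on which Python A
-- (and B) raise KeyError.
def Pre_reverse_letter_output_VIII (letter : String) (value : Int) : Prop :=
  letter ∈ lettersVIII.toList.map (fun c => String.mk [c])
instance (letter : String) (value : Int) : Decidable (Pre_reverse_letter_output_VIII letter value) := by
  unfold Pre_reverse_letter_output_VIII; infer_instance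

def pvWitness_reverse_letter_output_VIII : String × Int := ("a", 7)

def Spec_reverse_letter_output_VIII (letter : String) (value : Int) (out : Int) : Prop :=
  out = reverse_letter_output_VIII_alt letter value
instance (letter : String) (value : Int) (out : Int) : Decidable (Spec_reverse_letter_output_VIII letter value out) := by
  unfold Spec_reverse_letter_output_VIII; infer_instance

-- ===== CLAIM (what is proved, stated in full; the proofs are below) =====
def Claim_equal_reverse_letter_output_VIII : Prop := ∀ (letter : String) (value : Int), Dom_reverse_letter_output_VIII letter value → Pre_reverse_letter_output_VIII letter value → Spec_reverse_letter_output_VIII letter value (reverse_letter_output_VIII letter value)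

-- ===== LEMMAS AND PROOFS =====

-- last index (as in Python dict semantics: a later duplicate key overwrites) of letter among the
-- one-character strings of L; none = letter is not such a key
def refIdx : List Char → String → Option Nat
  | [], _ => none
  | c :: L, letter =>
    match refIdx L letter with
    | some j => some (j + 1)
    | none => if String.mk [c] = letter then some 0 else none

-- the cell written by A's loop, as a function of the value at write time
def cellA (w : Int) : Int := if PySem.Int.mod w 94 = 0 then 94 else PySem.Int.mod w 94

theorem foldA_get? (L : List Char) (d : PySem.Dict String Int) (v : Int) (letter : String) :
    ((L.foldl revStepA (d, v)).1.get? letter) =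
      match refIdx L letter with
      | some j => some (cellA (v + j))
      | none => d.get? letter := by
  induction L generalizing d v with
  | nil => simp [refIdx]
  | cons c L ih =>
    have hstep : L.foldl revStepA (revStepA (d, v) c) =
        L.foldl revStepA ((d.insert (String.mk [c]) (cellA v)), v + 1) := by
      unfold revStepA cellA; split_ifs <;> rfl
    simp only [List.foldl_cons, hstep, ih]
    cases h : refIdx L letter with
    | some j =>
      simp only [refIdx, h]
      have : v + 1 + (j : Int) = v + ((j : Nat) + 1 : Nat) := by push_cast; ring
      rw [this]
    | none =>
      simp only [refIdx, h]
      by_cases hc : String.mk [c] = letter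
      · simp [hc, PySem.Dict.get?_insert_self]
      · rw [PySem.Dict.get?_insert, if_neg (fun h' => hc h'.symm)]
        simp [hc]

theorem foldB_get? (L : List Char) (n : Int) (d : PySem.Dict String Int) (letter : String) :
    (((PySem.List.enumerate L n).foldl
        (fun d p => d.insert (String.mk [p.2]) p.1) d).get? letter) =
      match refIdx L letter with
      | some j => some (n + j)
      | none => d.get? letter := by
  induction L generalizing n d with
  | nil => simp [PySem.List.enumerate_nil, refIdx]
  | cons c L ih =>
    rw [PySem.List.enumerate_cons]
    simp only [List.foldl_cons, ih]
    cases h : refIdx L letter with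
    | some j =>
      simp only [refIdx, h]
      have : n + 1 + (j : Int) = n + ((j : Nat) + 1 : Nat) := by push_cast; ring
      rw [this]
    | none =>
      simp only [refIdx, h]
      by_cases hc : String.mk [c] = letter
      · simp [hc, PySem.Dict.get?_insert_self]
      · rw [PySem.Dict.get?_insert, if_neg (fun h' => hc h'.symm)]
        simp [hc]

-- the closed form agrees with A's tabulated cell
theorem cellA_closed (w : Int) : cellA w = PySem.Int.mod (w - 1) 94 + 1 := by
  unfold cellA
  simp only [PySem.Int.mod_eq_emod_of_pos (show (0:Int) < 94 by norm_num)]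
  split_ifs with h <;> omega

-- ===== VERDICT (by name: the statement is the Claim_ definition above) =====
theorem reverse_letter_output_VIII_spec : Claim_equal_reverse_letter_output_VIII := by
  intro letter value _ _
  unfold Spec_reverse_letter_output_VIII reverse_letter_output_VIII reverse_letter_output_VIII_alt indexMapVIII
  rw [foldA_get?, foldB_get? lettersVIII.toList 0 PySem.Dict.empty letter]
  cases h : refIdx lettersVIII.toList letter with
  | some j => simp [cellA_closed]
  | none => simp
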